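-- pv_equiv track=rewrite | github.com/Demuirgos/Programming-Training | Advent of Code/2020/day11.py | countadj
-- ===== SOURCE A (Python) =====
-- def countadj(state,i,j,offs,r):
--     if len(offs)!=0:
--         if 0 <= i + offs[0][0] < len(state[0]) and 0 <= j + offs[0][1] < len(state):
--             return countadj(state,i,j,offs[1:],((j,i),r[1] + (1 if state[j + offs[0][1]][i + offs[0][0]] == -1 else 0)))
--         else:
--             return countadj(state,i,j,offs[1:],r)
--     else:
--         return r
-- ===== SOURCE B (Python) =====
-- def countadj(state, i, j, offs, r):
--     # Two-pass: filter the in-bounds offsets once, then count the -1 cells among them.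
--     inb = [(dx, dy) for dx, dy in offs
--            if 0 <= i + dx < len(state[0]) and 0 <= j + dy < len(state)]
--     cnt = sum(1 for dx, dy in inb if state[j + dy][i + dx] == -1)
--     return ((j, i) if inb else r[0], r[1] + cnt)
-- ===== Notes on version B (the rewrite author's own statement) =====
-- stated objective: simpler
-- what changed: Replaces the tail-recursive per-offset accumulator rebinding with a filter of the in-bounds offsets followed by a count of -1 cells; the first component is (j,i) iff any offset was in bounds, else r[0].
import Mathlib
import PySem

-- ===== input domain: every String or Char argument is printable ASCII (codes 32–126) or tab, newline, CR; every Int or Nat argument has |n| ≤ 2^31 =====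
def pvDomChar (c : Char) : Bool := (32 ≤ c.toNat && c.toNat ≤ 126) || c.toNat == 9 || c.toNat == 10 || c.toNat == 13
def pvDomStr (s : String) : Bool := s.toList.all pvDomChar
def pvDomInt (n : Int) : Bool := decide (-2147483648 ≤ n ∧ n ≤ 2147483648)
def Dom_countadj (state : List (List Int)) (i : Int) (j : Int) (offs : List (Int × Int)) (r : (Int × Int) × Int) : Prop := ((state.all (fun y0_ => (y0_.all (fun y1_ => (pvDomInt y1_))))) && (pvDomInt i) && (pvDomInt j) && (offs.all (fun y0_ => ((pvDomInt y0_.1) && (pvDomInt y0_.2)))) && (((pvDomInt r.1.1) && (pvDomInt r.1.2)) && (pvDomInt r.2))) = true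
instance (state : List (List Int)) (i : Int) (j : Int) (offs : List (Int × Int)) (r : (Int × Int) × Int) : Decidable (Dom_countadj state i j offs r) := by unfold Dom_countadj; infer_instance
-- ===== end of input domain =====

-- B replaces A's tail recursion (rebinding the accumulator per offset) by a one-shot
-- filter of the in-bounds offsets followed by a count of the -1 cells among them.


-- shared guard: Python's `0 <= i+dx < len(state[0]) and 0 <= j+dy < len(state)`
def cadjInB (state : List (List Int)) (i : Int) (j : Int) (p : Int × Int) : Bool :=
  decide (0 ≤ i + p.1 ∧ i + p.1 < ((state.headD []).length : Int) ∧
          0 ≤ j + p.2 ∧ j + p.2 < (state.length : Int))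

-- cell lookup state[j+dy][i+dx]; under Pre_ both indices are valid, so getD is exact
def cadjCell (state : List (List Int)) (i : Int) (j : Int) (p : Int × Int) : Int :=
  ((state.getD (j + p.2).toNat []).getD (i + p.1).toNat 0)

-- ===== PORT A =====
def countadj (state : List (List Int)) (i : Int) (j : Int) (offs : List (Int × Int)) (r : (Int × Int) × Int) : (Int × Int) × Int :=
  match offs with
  | [] => r
  | p :: rest =>
    if cadjInB state i j p then
      countadj state i j rest ((j, i), r.2 + (if cadjCell state i j p = -1 then 1 else 0))
    else
      countadj state i j rest r

-- ===== PORT B =====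
def countadj_alt (state : List (List Int)) (i : Int) (j : Int) (offs : List (Int × Int)) (r : (Int × Int) × Int) : (Int × Int) × Int :=
  let inb := offs.filter (cadjInB state i j)
  let cnt := inb.foldl (fun acc p => acc + (if cadjCell state i j p = -1 then (1 : Int) else 0)) 0
  ((if inb ≠ [] then (j, i) else r.1), r.2 + cnt)

-- ===== PRECONDITION & SPEC =====
-- Pre_ excludes exactly the inputs where Python A raises an IndexError: offs nonempty with
-- an empty state (len(state[0])), or a ragged row shorter than row 0 hit by an in-bounds offset.
def Pre_countadj (state : List (List Int)) (i : Int) (j : Int) (offs : List (Int × Int)) (r : (Int × Int) × Int) : Prop :=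
  (offs = [] ∨ state ≠ []) ∧
  ∀ p ∈ offs, cadjInB state i j p = true →
    i + p.1 < ((state.getD (j + p.2).toNat []).length : Int)
instance (state : List (List Int)) (i : Int) (j : Int) (offs : List (Int × Int)) (r : (Int × Int) × Int) : Decidable (Pre_countadj state i j offs r) := by unfold Pre_countadj; infer_instance
def pvWitness_countadj : List (List Int) × Int × Int × (List (Int × Int)) × ((Int × Int) × Int) :=
  ([[-1, 0], [0, -1]], 0, 0, [(1, 0), (0, 1), (-1, -1)], ((7, 7), 2))

def Spec_countadj (state : List (List Int)) (i : Int) (j : Int) (offs : List (Int × Int)) (r : (Int × Int) × Int) (out : (Int × Int) × Int) : Prop := out = countadj_alt state i j offs r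
instance (state : List (List Int)) (i : Int) (j : Int) (offs : List (Int × Int)) (r : (Int × Int) × Int) (out : (Int × Int) × Int) : Decidable (Spec_countadj state i j offs r out) := by unfold Spec_countadj; infer_instance

-- ===== CLAIM (what is proved, stated in full; the proofs are below) =====
def Claim_equal_countadj : Prop := ∀ (state : List (List Int)) (i : Int) (j : Int) (offs : List (Int × Int)) (r : (Int × Int) × Int), Dom_countadj state i j offs r → Pre_countadj state i j offs r → Spec_countadj state i j offs r (countadj state i j offs r)

-- ===== LEMMAS AND PROOFS =====

-- shifting the start of B's counting fold
lemma cadj_foldl_shift (f : (Int × Int) → Int) (l : List (Int × Int)) (c : Int) :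
    l.foldl (fun acc p => acc + f p) c = c + l.foldl (fun acc p => acc + f p) 0 := by
  induction l generalizing c with
  | nil => simp
  | cons p t ih => simp only [List.foldl_cons]; rw [ih, ih (0 + f p)]; ring

-- the two ports agree on every input (the totalised Lean ports have no raising cases)
lemma cadj_eq (state : List (List Int)) (i j : Int) (offs : List (Int × Int)) (r : (Int × Int) × Int) :
    countadj state i j offs r = countadj_alt state i j offs r := by
  induction offs generalizing r with
  | nil => simp [countadj, countadj_alt]
  | cons p rest ih =>
    cases h : cadjInB state i j p with
    | true =>
      rw [show countadj state i j (p :: rest) r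
            = countadj state i j rest ((j, i), r.2 + (if cadjCell state i j p = -1 then 1 else 0))
          from by simp [countadj, h]]
      rw [ih]
      simp only [countadj_alt, List.filter_cons, h, if_true, List.foldl_cons, Int.zero_add]
      rw [cadj_foldl_shift (fun q => if cadjCell state i j q = -1 then (1 : Int) else 0)
            (rest.filter (cadjInB state i j)) (if cadjCell state i j p = -1 then (1 : Int) else 0)]
      by_cases hne : rest.filter (cadjInB state i j) = [] <;> simp [hne] <;> ring
    | false =>
      rw [show countadj state i j (p :: rest) r = countadj state i j rest r
          from by simp [countadj, h]]
      rw [ih]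
      simp only [countadj_alt, List.filter_cons, h, Bool.false_eq_true, if_false]

-- ===== VERDICT (by name: the statement is the Claim_ definition above) =====
theorem countadj_spec : Claim_equal_countadj := by
  intro state i j offs r _ _
  unfold Spec_countadj
  exact cadj_eq state i j offs r
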